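-- pv_equiv track=rewrite | github.com/CsongorMatyas/RayBasisSet | OURelemen.py | GetElemGrPe
-- ===== SOURCE A (Python) =====
-- def GetElemGrPe(z):
--     ElemOrd=[2,8,8,18,18,36,36]
--     period=1
--     group=0
--     for eleord in ElemOrd:
--         if group < z-eleord:
--             group+=eleord
--             period+=1
--     group=z-group
--     return group,period
-- ===== SOURCE B (Python) =====
-- def GetElemGrPe(z):
--     thresholds = [2, 10, 18, 36, 54, 90, 126]
--     lo, hi = 0, len(thresholds)
--     while lo < hi:
--         mid = (lo + hi) // 2
--         if thresholds[mid] < z: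
--             lo = mid + 1
--         else:
--             hi = mid
--     group = z - thresholds[lo - 1] if lo > 0 else z
--     return group, 1 + lo
-- ===== Notes on version B (the rewrite author's own statement) =====
-- stated objective: alternative
-- what changed: Replaces A's accumulating linear scan over shell sizes with a precomputed cumulative-threshold table queried by a hand-written bisect_left binary search; period is the count of thresholds below z plus one, and group is z minus the preceding threshold.
import Mathlib
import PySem

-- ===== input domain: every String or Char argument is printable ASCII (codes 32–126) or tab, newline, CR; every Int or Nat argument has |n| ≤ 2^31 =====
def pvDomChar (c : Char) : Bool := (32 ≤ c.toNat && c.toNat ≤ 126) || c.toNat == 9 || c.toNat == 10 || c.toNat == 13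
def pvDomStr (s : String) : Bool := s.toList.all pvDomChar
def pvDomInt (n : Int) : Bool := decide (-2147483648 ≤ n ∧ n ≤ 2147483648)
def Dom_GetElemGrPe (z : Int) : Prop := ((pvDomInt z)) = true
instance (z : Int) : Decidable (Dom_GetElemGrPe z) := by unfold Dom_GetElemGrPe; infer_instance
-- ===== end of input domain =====

-- B replaces A's accumulating linear scan with a cumulative-threshold table queried by binary search (alternative algorithm, same result).


-- ===== PORT A =====
def GetElemGrPe (z : Int) : Int × Int :=
  let ElemOrd : List Int := [2, 8, 8, 18, 18, 36, 36]
  let s := ElemOrd.foldl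
    (fun (pg : Int × Int) eleord =>
      if pg.2 < z - eleord then (pg.1 + 1, pg.2 + eleord) else pg)
    (1, 0)          -- (period, group)
  (z - s.2, s.1)

-- ===== PORT B =====
-- hand-written bisect_left loop from Source B (while lo < hi: …), as recursion on hi - lo
def bisectLeftLoop (a : List Int) (x : Int) (lo hi : Nat) : Nat :=
  if lo < hi then
    let mid := (lo + hi) / 2
    if a.getD mid 0 < x then bisectLeftLoop a x (mid + 1) hi
    else bisectLeftLoop a x lo mid
  else lo
termination_by hi - lo
decreasing_by all_goals omega

def GetElemGrPe_alt (z : Int) : Int × Int :=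
  let thresholds : List Int := [2, 10, 18, 36, 54, 90, 126]
  let lo := bisectLeftLoop thresholds z 0 thresholds.length
  ((if lo > 0 then z - thresholds.getD (lo - 1) 0 else z), 1 + (lo : Int))

-- ===== PRECONDITION & SPEC =====
def Spec_GetElemGrPe (z : Int) (out : Int × Int) : Prop := out = GetElemGrPe_alt z
instance (z : Int) (out : Int × Int) : Decidable (Spec_GetElemGrPe z out) := by unfold Spec_GetElemGrPe; infer_instance

-- ===== CLAIM (what is proved, stated in full; the proofs are below) =====
def Claim_equal_GetElemGrPe : Prop := ∀ (z : Int), Dom_GetElemGrPe z → Spec_GetElemGrPe z (GetElemGrPe z)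

-- ===== LEMMAS AND PROOFS =====
theorem a_eval (z : Int) : GetElemGrPe z =
    (if (126:Int) < z then (z - 126, 8) else (if (90:Int) < z then (z - 90, 7) else (if (54:Int) < z then (z - 54, 6) else (if (36:Int) < z then (z - 36, 5) else (if (18:Int) < z then (z - 18, 4) else (if (10:Int) < z then (z - 10, 3) else (if (2:Int) < z then (z - 2, 2) else (z, 1)))))))) := by
  unfold GetElemGrPe
  by_cases h1 : (2:Int) < z
  · by_cases h2 : (10:Int) < z
    · by_cases h3 : (18:Int) < z
      · by_cases h4 : (36:Int) < z
        · by_cases h5 : (54:Int) < z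
          · by_cases h6 : (90:Int) < z
            · by_cases h7 : (126:Int) < z
              · have t0 : (0:Int) < z - 2 := by omega
                have u0 : (2:Int) < z := by omega
                have t1 : (2:Int) < z - 8 := by omega
                have u1 : (10:Int) < z := by omega
                have t2 : (10:Int) < z - 8 := by omega
                have u2 : (18:Int) < z := by omega
                have t3 : (18:Int) < z - 18 := by omega
                have u3 : (36:Int) < z := by omega
                have t4 : (36:Int) < z - 18 := by omega
                have u4 : (54:Int) < z := by omega
                have t5 : (54:Int) < z - 36 := by omega
                have u5 : (90:Int) < z := by omega
                have t6 : (90:Int) < z - 36 := by omega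
                have u6 : (126:Int) < z := by omega
                simp [List.foldl, u0, t1, t2, t3, t4, t5, t6, u6]
              · have t0 : (0:Int) < z - 2 := by omega
                have u0 : (2:Int) < z := by omega
                have t1 : (2:Int) < z - 8 := by omega
                have u1 : (10:Int) < z := by omega
                have t2 : (10:Int) < z - 8 := by omega
                have u2 : (18:Int) < z := by omega
                have t3 : (18:Int) < z - 18 := by omega
                have u3 : (36:Int) < z := by omega
                have t4 : (36:Int) < z - 18 := by omega
                have u4 : (54:Int) < z := by omega
                have t5 : (54:Int) < z - 36 := by omega
                have u5 : (90:Int) < z := by omega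
                have f6 : ¬((90:Int) < z - 36) := by omega
                have m6 : ¬((126:Int) < z) := by omega
                simp [List.foldl, u0, t1, t2, t3, t4, t5, u5, f6, m6]
            · have t0 : (0:Int) < z - 2 := by omega
              have u0 : (2:Int) < z := by omega
              have t1 : (2:Int) < z - 8 := by omega
              have u1 : (10:Int) < z := by omega
              have t2 : (10:Int) < z - 8 := by omega
              have u2 : (18:Int) < z := by omega
              have t3 : (18:Int) < z - 18 := by omega
              have u3 : (36:Int) < z := by omega
              have t4 : (36:Int) < z - 18 := by omega
              have u4 : (54:Int) < z := by omega
              have f5 : ¬((54:Int) < z - 36) := by omega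
              have m5 : ¬((90:Int) < z) := by omega
              have n6 : ¬((126:Int) < z) := by omega
              simp [List.foldl, u0, t1, t2, t3, t4, u4, f5, m5, n6]
          · have t0 : (0:Int) < z - 2 := by omega
            have u0 : (2:Int) < z := by omega
            have t1 : (2:Int) < z - 8 := by omega
            have u1 : (10:Int) < z := by omega
            have t2 : (10:Int) < z - 8 := by omega
            have u2 : (18:Int) < z := by omega
            have t3 : (18:Int) < z - 18 := by omega
            have u3 : (36:Int) < z := by omega
            have f4 : ¬((36:Int) < z - 18) := by omega
            have m4 : ¬((54:Int) < z) := by omega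
            have f5 : ¬((36:Int) < z - 36) := by omega
            have m5 : ¬((72:Int) < z) := by omega
            have n5 : ¬((90:Int) < z) := by omega
            have n6 : ¬((126:Int) < z) := by omega
            simp [List.foldl, u0, t1, t2, t3, u3, f4, m4, f5, n5, n6]
        · have t0 : (0:Int) < z - 2 := by omega
          have u0 : (2:Int) < z := by omega
          have t1 : (2:Int) < z - 8 := by omega
          have u1 : (10:Int) < z := by omega
          have t2 : (10:Int) < z - 8 := by omega
          have u2 : (18:Int) < z := by omega
          have f3 : ¬((18:Int) < z - 18) := by omega
          have m3 : ¬((36:Int) < z) := by omega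
          have f5 : ¬((18:Int) < z - 36) := by omega
          have m5 : ¬((54:Int) < z) := by omega
          have n4 : ¬((54:Int) < z) := by omega
          have n5 : ¬((90:Int) < z) := by omega
          have n6 : ¬((126:Int) < z) := by omega
          simp [List.foldl, u0, t1, t2, u2, f3, m3, f5, m5, n5, n6]
      · have t0 : (0:Int) < z - 2 := by omega
        have u0 : (2:Int) < z := by omega
        have t1 : (2:Int) < z - 8 := by omega
        have u1 : (10:Int) < z := by omega
        have f2 : ¬((10:Int) < z - 8) := by omega
        have m2 : ¬((18:Int) < z) := by omega
        have f3 : ¬((10:Int) < z - 18) := by omega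
        have m3 : ¬((28:Int) < z) := by omega
        have f5 : ¬((10:Int) < z - 36) := by omega
        have m5 : ¬((46:Int) < z) := by omega
        have n3 : ¬((36:Int) < z) := by omega
        have n4 : ¬((54:Int) < z) := by omega
        have n5 : ¬((90:Int) < z) := by omega
        have n6 : ¬((126:Int) < z) := by omega
        simp [List.foldl, u0, t1, u1, f2, m2, f3, f5, n3, n4, n5, n6]
    · have t0 : (0:Int) < z - 2 := by omega
      have u0 : (2:Int) < z := by omega
      have f1 : ¬((2:Int) < z - 8) := by omega
      have m1 : ¬((10:Int) < z) := by omega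
      have f3 : ¬((2:Int) < z - 18) := by omega
      have m3 : ¬((20:Int) < z) := by omega
      have f5 : ¬((2:Int) < z - 36) := by omega
      have m5 : ¬((38:Int) < z) := by omega
      have n2 : ¬((18:Int) < z) := by omega
      have n3 : ¬((36:Int) < z) := by omega
      have n4 : ¬((54:Int) < z) := by omega
      have n5 : ¬((90:Int) < z) := by omega
      have n6 : ¬((126:Int) < z) := by omega
      simp [List.foldl, u0, f1, m1, f3, f5, n2, n3, n4, n5, n6]
  · have f0 : ¬((0:Int) < z - 2) := by omega
    have m0 : ¬((2:Int) < z) := by omega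
    have m1 : ¬((8:Int) < z) := by omega
    have m3 : ¬((18:Int) < z) := by omega
    have m5 : ¬((36:Int) < z) := by omega
    have n1 : ¬((10:Int) < z) := by omega
    have n4 : ¬((54:Int) < z) := by omega
    have n5 : ¬((90:Int) < z) := by omega
    have n6 : ¬((126:Int) < z) := by omega
    simp [List.foldl, m0, m1, m3, m5, n1, n4, n5, n6]


theorem b_eval (z : Int) : GetElemGrPe_alt z =
    (if (126:Int) < z then (z - 126, 8) else (if (90:Int) < z then (z - 90, 7) else (if (54:Int) < z then (z - 54, 6) else (if (36:Int) < z then (z - 36, 5) else (if (18:Int) < z then (z - 18, 4) else (if (10:Int) < z then (z - 10, 3) else (if (2:Int) < z then (z - 2, 2) else (z, 1)))))))) := by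
  unfold GetElemGrPe_alt
  simp [bisectLeftLoop, List.getD]
  split_ifs <;> first
    | rfl
    | (exfalso; omega)

-- ===== VERDICT (by name: the statement is the Claim_ definition above) =====
theorem GetElemGrPe_spec : Claim_equal_GetElemGrPe := by
  intro z _
  unfold Spec_GetElemGrPe
  rw [a_eval, b_eval]
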